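-- pv_equiv track=rewrite | github.com/jej29/public_http_agent | agent/agent/analysis/features.py | _parse_cookie_names_from_cookie_header
-- ===== SOURCE A (Python) =====
-- from typing import Any, Dict, List
--
-- def _parse_cookie_names_from_cookie_header(raw_cookie: str) -> List[str]:
--     out: List[str] = []
--     seen = set()
--
--     raw = str(raw_cookie or "").strip()
--     if not raw:
--         return out
--
--     for part in raw.split(";"):
--         token = str(part or "").strip()
--         if not token or "=" not in token:
--             continue
--         name = token.split("=", 1)[0].strip()
--         if not name or name in seen:
--             continue
--         seen.add(name)
--         out.append(name)
--
--     return out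
-- ===== SOURCE B (Python) =====
-- from typing import List
--
-- def _parse_cookie_names_from_cookie_header(raw_cookie: str) -> List[str]:
--     out: List[str] = []
--     seen = set()
--     buf: List[str] = []
--     has_eq = False
--     # single char-level scan; a trailing separator flushes the last segment
--     for ch in str(raw_cookie or "").strip() + ";":
--         if ch == ";":
--             if has_eq:
--                 name = "".join(buf).strip()
--                 if name and name not in seen:
--                     seen.add(name)
--                     out.append(name)
--             buf = []
--             has_eq = False
--         elif ch == "=":
--             has_eq = True
--         elif not has_eq:
--             buf.append(ch)
--     return out
-- ===== Notes on version B (the rewrite author's own statement) =====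
-- stated objective: alternative
-- what changed: Replaces A's split-on-semicolon per-part processing by a single character-level state machine: one scan over the stripped header (with a flushing trailing separator) maintaining a name buffer and an equals-sign-seen flag, flushing a deduplicated name at each separator.
import Mathlib
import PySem

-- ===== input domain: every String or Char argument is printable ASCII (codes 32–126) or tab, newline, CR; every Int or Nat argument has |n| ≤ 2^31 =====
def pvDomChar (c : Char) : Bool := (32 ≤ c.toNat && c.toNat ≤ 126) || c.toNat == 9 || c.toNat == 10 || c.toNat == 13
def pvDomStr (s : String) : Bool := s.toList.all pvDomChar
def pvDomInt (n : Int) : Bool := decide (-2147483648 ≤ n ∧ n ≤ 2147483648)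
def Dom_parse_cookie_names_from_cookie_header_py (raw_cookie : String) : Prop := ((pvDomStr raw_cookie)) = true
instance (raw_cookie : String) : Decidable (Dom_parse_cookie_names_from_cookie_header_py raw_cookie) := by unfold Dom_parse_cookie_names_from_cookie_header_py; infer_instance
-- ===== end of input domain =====

-- B replaces A's split-on-semicolon per-part processing by a single character-level state machine (name buffer + equals-sign-seen flag, flushed at each separator); same return values.


-- ===== PORT A =====
-- str(raw_cookie or "") is the identity on a str argument, so it is ported as raw_cookie itself.
def parse_cookie_names_from_cookie_header_py (raw_cookie : String) : List String :=
  let raw := PySem.Str.strip raw_cookie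
  if raw == "" then []
  else
    (((PySem.Str.split? raw ";").getD []).foldl
      (fun (st : List String × PySem.Set String) part =>
        let token := PySem.Str.strip part
        if token == "" || !PySem.Str.isIn "=" token then st
        else
          let name := PySem.Str.strip
            (PySem.List.pyGetD ((PySem.Str.splitMax? token "=" 1).getD []) 0 "")
          if name == "" || PySem.Set.contains st.2 name then st
          else (st.1 ++ [name], PySem.Set.add st.2 name))
      ([], PySem.Set.empty)).1

-- ===== PORT B =====
-- One foldl over the characters of the stripped header with a trailing separator;
-- state = ((out, seen), buf, has_eq); ''.join(buf) of a char buffer is String.ofList.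
-- the loop body: state = ((out, seen), buf, has_eq)
def pvBStep (st : (List String × PySem.Set String) × List Char × Bool) (ch : Char) : (List String × PySem.Set String) × List Char × Bool :=
  if ch == ';' then
    if st.2.2 then
      let name := String.ofList (PySem.Chars.strip st.2.1)
      if name == "" || PySem.Set.contains st.1.2 name then (st.1, [], false)
      else ((st.1.1 ++ [name], PySem.Set.add st.1.2 name), [], false)
    else (st.1, [], false)
  else if ch == '=' then (st.1, st.2.1, true)
  else if st.2.2 then st else (st.1, st.2.1 ++ [ch], false)

def parse_cookie_names_from_cookie_header_py_alt (raw_cookie : String) : List String :=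
  let raw := PySem.Str.strip raw_cookie
  ((raw.toList ++ [';']).foldl pvBStep (([], PySem.Set.empty), [], false)).1.1

-- ===== PRECONDITION & SPEC =====
def Spec_parse_cookie_names_from_cookie_header_py (raw_cookie : String) (out : List String) : Prop := out = parse_cookie_names_from_cookie_header_py_alt raw_cookie
instance (raw_cookie : String) (out : List String) : Decidable (Spec_parse_cookie_names_from_cookie_header_py raw_cookie out) := by unfold Spec_parse_cookie_names_from_cookie_header_py; infer_instance

-- ===== CLAIM (what is proved, stated in full; the proofs are below) =====
def Claim_equal_parse_cookie_names_from_cookie_header_py : Prop := ∀ (raw_cookie : String), Dom_parse_cookie_names_from_cookie_header_py raw_cookie → Spec_parse_cookie_names_from_cookie_header_py raw_cookie (parse_cookie_names_from_cookie_header_py raw_cookie)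

-- ===== LEMMAS AND PROOFS =====

-- shared abstract step: add a name unless empty or already seen
def pvDedupAdd (p : List String × PySem.Set String) (name : String) : List String × PySem.Set String :=
  if name == "" || PySem.Set.contains p.2 name then p
  else (p.1 ++ [name], PySem.Set.add p.2 name)

-- what one ';'-separated segment contributes
def pvSegStep (p : List String × PySem.Set String) (seg : List Char) : List String × PySem.Set String :=
  if '=' ∈ seg then pvDedupAdd p (String.ofList (PySem.Chars.strip (seg.takeWhile (fun c => c != '=')))) else p

-- B's machine state flushed against the FIRST remaining segment
def pvFin (p : List String × PySem.Set String) (buf : List Char) (he : Bool) (seg : List Char) : List String × PySem.Set String :=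
  if he then pvDedupAdd p (String.ofList (PySem.Chars.strip buf))
  else if '=' ∈ seg then pvDedupAdd p (String.ofList (PySem.Chars.strip (buf ++ seg.takeWhile (fun c => c != '=')))) else p

theorem bstep_semi (p : List String × PySem.Set String) (buf : List Char) (he : Bool) :
    pvBStep (p, buf, he) ';' = (pvFin p buf he [], [], false) := by
  cases he <;> simp only [pvBStep, pvFin, pvDedupAdd] <;> split <;> split <;> first | rfl | (split <;> rfl) | simp_all

theorem mem_dropWhile_iff {α : Type} {c : α} {q : α → Bool} (hc : q c = false) :
    ∀ (l : List α), (c ∈ l.dropWhile q ↔ c ∈ l) := by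
  intro l
  induction l with
  | nil => simp
  | cons a t ih =>
    by_cases ha : q a
    · simp [ha, ih]
      intro h; rw [h] at hc; simp [ha] at hc
    · simp [ha]

theorem mem_strip_iff {c : Char} (hc : PySem.Chars.isspace c = false) (l : List Char) :
    c ∈ PySem.Chars.strip l ↔ c ∈ l := by
  simp [PySem.Chars.strip, PySem.Chars.rstrip, PySem.Chars.lstrip,
    mem_dropWhile_iff hc]

theorem go_zero : ∀ (fuel : Nat) (l cur : List Char) (acc : List (List Char)),
    PySem.Chars.splitOnMax.go ['='] fuel 0 l cur acc = acc.reverse ++ [cur.reverse ++ l] := by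
  intro fuel l cur acc
  cases fuel with
  | zero => simp [PySem.Chars.splitOnMax.go]
  | succ f =>
    cases l with
    | nil => simp [PySem.Chars.splitOnMax.go]
    | cons c rest => simp [PySem.Chars.splitOnMax.go]

theorem go_one : ∀ (fuel : Nat) (l cur : List Char) (acc : List (List Char)), l.length < fuel →
    PySem.Chars.splitOnMax.go ['='] fuel 1 l cur acc =
      if '=' ∈ l then
        acc.reverse ++ [cur.reverse ++ l.takeWhile (fun c => c != '='),
          (l.dropWhile (fun c => c != '=')).drop 1]
      else acc.reverse ++ [cur.reverse ++ l] := by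
  intro fuel
  induction fuel with
  | zero => intro l cur acc h; omega
  | succ f ih =>
    intro l cur acc h
    cases l with
    | nil => simp [PySem.Chars.splitOnMax.go]
    | cons c rest =>
      by_cases hc : c = '='
      · subst hc
        simp only [PySem.Chars.splitOnMax.go]
        rw [if_neg (by omega : ¬ (1 = 0)), if_pos (by simp [List.isPrefixOf] : (['='].isPrefixOf ('=' :: rest)) = true), go_zero]
        simp
      · have hne : ('=' == c) = false := beq_eq_false_iff_ne.mpr (Ne.symm hc)
        simp only [PySem.Chars.splitOnMax.go, List.isPrefixOf, hne, Bool.false_and,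
          if_neg (by omega : ¬ (1 = 0)), Bool.false_eq_true, if_false]
        rw [ih rest (c :: cur) acc (by simpa using Nat.lt_of_succ_lt_succ h)]
        have hm : ('=' ∈ c :: rest) = ('=' ∈ rest) := by simp [List.mem_cons, Ne.symm hc]
        have hnec : (c != '=') = true := by simp [hc]
        by_cases hr : '=' ∈ rest <;>
          simp [hm, hr, hnec]

theorem splitOnMax_of_mem {l : List Char} (h : '=' ∈ l) :
    PySem.Chars.splitOnMax l ['='] 1 =
      [l.takeWhile (fun c => c != '='), (l.dropWhile (fun c => c != '=')).drop 1] := by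
  rw [PySem.Chars.splitOnMax, if_neg (by omega)]
  rw [(by norm_num : Int.toNat 1 = 1), go_one (l.length + 1) l [] [] (by omega)]
  simp [h]

theorem takeWhile_append_of_mem {l1 : List Char} (h : '=' ∈ l1) (l2 : List Char) :
    (l1 ++ l2).takeWhile (fun c => c != '=') = l1.takeWhile (fun c => c != '=') := by
  induction l1 with
  | nil => simp at h
  | cons a t ih =>
    by_cases ha : a = '='
    · subst ha; simp
    · have : '=' ∈ t := by simpa [Ne.symm ha] using h
      simp [ha, ih this]

theorem takeWhile_space_prefix {w : List Char} (hw : ∀ c ∈ w, PySem.Chars.isspace c = true)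
    (x : List Char) :
    (w ++ x).takeWhile (fun c => c != '=') = w ++ x.takeWhile (fun c => c != '=') := by
  induction w with
  | nil => simp
  | cons a t ih =>
    have ha : (a != '=') = true := by
      have := hw a (by simp)
      simp only [bne_iff_ne, ne_eq]
      intro h; subst h; simp [PySem.Chars.isspace] at this
    simp [ha, ih (fun c hc => hw c (by simp [hc]))]

theorem strip_space_prefix {w : List Char} (hw : ∀ c ∈ w, PySem.Chars.isspace c = true)
    (x : List Char) : PySem.Chars.strip (w ++ x) = PySem.Chars.strip x := by
  have : (w ++ x).dropWhile PySem.Chars.isspace = x.dropWhile PySem.Chars.isspace := by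
    induction w with
    | nil => simp
    | cons a t ih => simp [hw a (by simp), ih (fun c hc => hw c (by simp [hc]))]
  simp [PySem.Chars.strip, PySem.Chars.lstrip, this]

theorem strip_take_strip (p : List Char) (hp : '=' ∈ p) :
    PySem.Chars.strip ((PySem.Chars.strip p).takeWhile (fun c => c != '=')) =
    PySem.Chars.strip (p.takeWhile (fun c => c != '=')) := by
  set r := PySem.Chars.lstrip p with hr
  have hmemr : '=' ∈ r := by
    rw [hr]; unfold PySem.Chars.lstrip
    exact (mem_dropWhile_iff (by decide) p).mpr hp
  have hdec : r = PySem.Chars.rstrip r ++ (r.reverse.takeWhile PySem.Chars.isspace).reverse := by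
    unfold PySem.Chars.rstrip
    rw [← List.reverse_append, ← List.takeWhile_append_dropWhile (p := PySem.Chars.isspace) (l := r.reverse)]
    simp
  have hw' : ∀ c ∈ (r.reverse.takeWhile PySem.Chars.isspace).reverse, PySem.Chars.isspace c = true := by
    intro c hc; exact List.mem_takeWhile_imp (by simpa using hc)
  have hmemrs : '=' ∈ PySem.Chars.rstrip r := by
    have hm2 : '=' ∈ PySem.Chars.rstrip r ++ (r.reverse.takeWhile PySem.Chars.isspace).reverse := by
      rw [← hdec]; exact hmemr
    rcases List.mem_append.mp hm2 with h | h
    · exact h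
    · have := hw' '=' h; simp [PySem.Chars.isspace] at this
  have h1 : (PySem.Chars.strip p).takeWhile (fun c => c != '=') = r.takeWhile (fun c => c != '=') := by
    have : PySem.Chars.strip p = PySem.Chars.rstrip r := by rw [PySem.Chars.strip, hr]
    rw [this]
    conv_rhs => rw [hdec]
    rw [takeWhile_append_of_mem hmemrs]
  have hwp : ∀ c ∈ p.takeWhile PySem.Chars.isspace, PySem.Chars.isspace c = true :=
    fun c hc => List.mem_takeWhile_imp hc
  have h2 : p.takeWhile (fun c => c != '=') =
      p.takeWhile PySem.Chars.isspace ++ r.takeWhile (fun c => c != '=') := by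
    conv_lhs => rw [← List.takeWhile_append_dropWhile (p := PySem.Chars.isspace) (l := p)]
    rw [takeWhile_space_prefix hwp]
    simp [hr, PySem.Chars.lstrip]
  rw [h1, h2, strip_space_prefix hwp]

theorem isIn_eq_mem (s : String) :
    PySem.Str.isIn "=" s = decide ('=' ∈ s.toList) := by
  rcases h : PySem.Str.isIn "=" s with _ | _
  · have := (PySem.Str.isIn_iff_infix "=" s)
    rw [h] at this
    simp only [Bool.false_eq_true, false_iff] at this
    have : ¬ '=' ∈ s.toList := by
      intro hm; exact this (by simpa using (List.singleton_infix_iff '=' s.toList).mpr hm)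
    simp [this]
  · have := (PySem.Str.isIn_iff_infix "=" s).mp h
    have : '=' ∈ s.toList := by
      have := (List.singleton_infix_iff '=' s.toList).mp (by simpa using this)
      exact this
    simp [this]

theorem guard_eq (part : String) :
    (PySem.Str.strip part == "" || !PySem.Str.isIn "=" (PySem.Str.strip part))
      = !PySem.Str.isIn "=" part := by
  have hmem : '=' ∈ (PySem.Str.strip part).toList ↔ '=' ∈ part.toList := by
    rw [PySem.Str.toList_strip]; exact mem_strip_iff (by decide) part.toList
  by_cases hp : '=' ∈ part.toList
  · have h1 : '=' ∈ (PySem.Str.strip part).toList := hmem.mpr hp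
    have h2 : ¬ (PySem.Str.strip part == "") := by
      intro h
      rw [beq_iff_eq] at h
      rw [h] at h1; simp at h1
    rw [isIn_eq_mem, isIn_eq_mem]
    simp only [] at *
    have h1' : '=' ∈ PySem.Chars.strip part.toList := by
      rw [← PySem.Str.toList_strip]; exact h1
    simp [hp, h1', Bool.eq_false_iff.mpr h2]
  · rw [isIn_eq_mem, isIn_eq_mem]
    have h0' : '=' ∉ PySem.Chars.strip part.toList := by
      rw [← PySem.Str.toList_strip]; exact hmem.not.mpr hp
    simp [hp, h0']

-- A's extracted name, computed from the raw part
theorem splitmax_name (s : String) (hs : '=' ∈ s.toList) :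
    PySem.Str.strip (PySem.List.pyGetD ((PySem.Str.splitMax? s "=" 1).getD []) 0 "")
      = String.ofList (PySem.Chars.strip (s.toList.takeWhile (fun c => c != '='))) := by
  rw [PySem.Str.splitMax?]
  have : PySem.Chars.splitMax? s.toList "=".toList 1 =
      some [s.toList.takeWhile (fun c => c != '='),
        (s.toList.dropWhile (fun c => c != '=')).drop 1] := by
    have ht : "=".toList = ['='] := by decide
    rw [PySem.Chars.splitMax?, ht]
    rw [if_neg (by decide)]
    rw [splitOnMax_of_mem (by simpa using hs)]
  rw [this]
  simp only [Option.map_some, Option.getD_some, List.map_cons]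
  rw [PySem.List.pyGetD_zero_cons]
  apply String.toList_inj.mp
  rw [PySem.Str.toList_strip, String.toList_ofList, String.toList_ofList]

theorem name_of_part (part : String) (hp : '=' ∈ part.toList) :
    PySem.Str.strip (PySem.List.pyGetD
        ((PySem.Str.splitMax? (PySem.Str.strip part) "=" 1).getD []) 0 "")
      = String.ofList (PySem.Chars.strip (part.toList.takeWhile (fun c => c != '='))) := by
  have hps : '=' ∈ (PySem.Str.strip part).toList := by
    rw [PySem.Str.toList_strip]; exact (mem_strip_iff (by decide) part.toList).mpr hp
  rw [splitmax_name (PySem.Str.strip part) hps]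
  rw [PySem.Str.toList_strip]
  rw [strip_take_strip part.toList hp]

-- A's fold over the (string) parts = the abstract segment fold
theorem afold (segs : List (List Char)) : ∀ (p : List String × PySem.Set String),
    (segs.map String.ofList).foldl
      (fun (st : List String × PySem.Set String) part =>
        let token := PySem.Str.strip part
        if token == "" || !PySem.Str.isIn "=" token then st
        else
          let name := PySem.Str.strip
            (PySem.List.pyGetD ((PySem.Str.splitMax? token "=" 1).getD []) 0 "")
          if name == "" || PySem.Set.contains st.2 name then st
          else (st.1 ++ [name], PySem.Set.add st.2 name)) p
      = segs.foldl pvSegStep p := by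
  induction segs with
  | nil => intro p; rfl
  | cons seg t ih =>
    intro p
    simp only [List.map_cons, List.foldl_cons]
    have hseg : (String.ofList seg).toList = seg := String.toList_ofList
    by_cases hm : '=' ∈ seg
    · have hmm : '=' ∈ (String.ofList seg).toList := by rw [hseg]; exact hm
      have hg : (PySem.Str.strip (String.ofList seg) == ""
          || !PySem.Str.isIn "=" (PySem.Str.strip (String.ofList seg))) = false := by
        rw [guard_eq, isIn_eq_mem]
        simp [hseg, hm]
      rw [hg]
      simp only [Bool.false_eq_true, if_false]
      rw [name_of_part (String.ofList seg) hmm, hseg]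
      rw [ih]
      simp [pvSegStep, hm, pvDedupAdd]
    · have hmm : '=' ∉ (String.ofList seg).toList := by rw [hseg]; exact hm
      have hg : (PySem.Str.strip (String.ofList seg) == ""
          || !PySem.Str.isIn "=" (PySem.Str.strip (String.ofList seg))) = true := by
        rw [guard_eq, isIn_eq_mem]
        simp [hseg, hm]
      rw [hg]
      simp only [if_true]
      rw [ih]
      simp [pvSegStep, hm]

-- PySem's splitter agrees with Mathlib's splitOnP on the single separator ';'
theorem goBridge : ∀ (fuel : Nat) (l cur : List Char) (acc : List (List Char)), l.length < fuel →
    PySem.Chars.splitOn.go [';'] fuel l cur acc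
      = acc.reverse ++ (List.splitOnP (fun c => c == ';') l).modifyHead (fun x => cur.reverse ++ x) := by
  intro fuel
  induction fuel with
  | zero => intro l cur acc h; omega
  | succ f ih =>
    intro l cur acc h
    cases l with
    | nil => simp [PySem.Chars.splitOn.go, List.splitOnP_nil]
    | cons c rest =>
      by_cases hc : c = ';'
      · subst hc
        simp only [PySem.Chars.splitOn.go]
        rw [if_pos (by simp [List.isPrefixOf])]
        simp only [List.length_cons, List.length_nil, List.drop_succ_cons, List.drop_zero]
        rw [ih rest [] (cur.reverse :: acc) (by simpa using Nat.lt_of_succ_lt_succ h)]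
        have hs : List.splitOnP (fun c => c == ';') (';' :: rest)
            = [] :: List.splitOnP (fun c => c == ';') rest := by
          simp [List.splitOnP_cons]
        rw [hs]
        obtain ⟨t0, ts, ht⟩ := List.exists_cons_of_ne_nil (List.splitOnP_ne_nil (fun c => c == ';') rest)
        rw [ht]
        simp
      · have hne : ([';'].isPrefixOf (c :: rest)) = false := by
          simp [List.isPrefixOf, Ne.symm hc]
        simp only [PySem.Chars.splitOn.go, hne, Bool.false_eq_true, if_false]
        rw [ih rest (c :: cur) acc (by simpa using Nat.lt_of_succ_lt_succ h)]
        have hs : List.splitOnP (fun c => c == ';') (c :: rest)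
            = (List.splitOnP (fun c => c == ';') rest).modifyHead (List.cons c) := by
          simp [List.splitOnP_cons, hc]
        rw [hs]
        obtain ⟨t0, ts, ht⟩ := List.exists_cons_of_ne_nil (List.splitOnP_ne_nil (fun c => c == ';') rest)
        rw [ht]
        simp

theorem pySplitOn_eq (l : List Char) :
    PySem.Chars.splitOn l [';'] = List.splitOnP (fun c => c == ';') l := by
  rw [PySem.Chars.splitOn, goBridge (l.length + 1) l [] [] (by omega)]
  obtain ⟨t0, ts, ht⟩ := List.exists_cons_of_ne_nil (List.splitOnP_ne_nil (fun c => c == ';') l)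
  rw [ht]
  simp

-- B's machine over (l ++ [';']) = the abstract segment fold over l's segments
theorem machine (l : List Char) : ∀ (p : List String × PySem.Set String) (buf : List Char) (he : Bool)
    (s0 : List Char) (rest : List (List Char)),
    List.splitOnP (fun c => c == ';') l = s0 :: rest →
    (l ++ [';']).foldl pvBStep (p, buf, he) = (rest.foldl pvSegStep (pvFin p buf he s0), [], false) := by
  induction l with
  | nil =>
    intro p buf he s0 rest hs
    rw [List.splitOnP_nil] at hs
    cases hs
    simp only [List.nil_append, List.foldl_cons, List.foldl_nil, bstep_semi]
  | cons c t ih =>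
    intro p buf he s0 rest hs
    by_cases hc : c = ';'
    · subst hc
      have hsplit : List.splitOnP (fun c => c == ';') (';' :: t)
          = [] :: List.splitOnP (fun c => c == ';') t := by simp [List.splitOnP_cons]
      rw [hsplit] at hs
      obtain ⟨hs0, hrest⟩ := List.cons.inj hs
      obtain ⟨t0, ts, ht⟩ := List.exists_cons_of_ne_nil (List.splitOnP_ne_nil (fun c => c == ';') t)
      simp only [List.cons_append, List.foldl_cons, bstep_semi]
      rw [ih (pvFin p buf he []) [] false t0 ts ht]
      subst hs0
      rw [← hrest, ht]
      simp only [List.foldl_cons]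
      have : pvFin (pvFin p buf he []) [] false t0 = pvSegStep (pvFin p buf he []) t0 := by
        simp [pvFin, pvSegStep]
      rw [this]
    · have hsplit : List.splitOnP (fun c => c == ';') (c :: t)
          = (List.splitOnP (fun c => c == ';') t).modifyHead (List.cons c) := by
        simp [List.splitOnP_cons, hc]
      obtain ⟨t0, ts, ht⟩ := List.exists_cons_of_ne_nil (List.splitOnP_ne_nil (fun c => c == ';') t)
      rw [hsplit, ht] at hs
      simp only [List.modifyHead_cons] at hs
      obtain ⟨hs0, hrest⟩ := List.cons.inj hs
      subst hs0; subst hrest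
      by_cases he' : he = true
      · subst he'
        have hstep : pvBStep (p, buf, true) c = (p, buf, true) := by
          by_cases hce : c = '='
          · subst hce; rfl
          · simp [pvBStep, hc, hce]
        simp only [List.cons_append, List.foldl_cons, hstep]
        rw [ih p buf true t0 ts ht]
        simp [pvFin]
      · have hf : he = false := by simpa using he'
        subst hf
        by_cases hce : c = '='
        · subst hce
          have hstep : pvBStep (p, buf, false) '=' = (p, buf, true) := rfl
          simp only [List.cons_append, List.foldl_cons, hstep]
          rw [ih p buf true t0 ts ht]
          have : pvFin p buf true t0 = pvFin p buf false ('=' :: t0) := by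
            simp [pvFin]
          rw [this]
        · have hstep : pvBStep (p, buf, false) c = (p, buf ++ [c], false) := by
            simp [pvBStep, hc, hce]
          simp only [List.cons_append, List.foldl_cons, hstep]
          rw [ih p (buf ++ [c]) false t0 ts ht]
          have hmem : ('=' ∈ c :: t0) = ('=' ∈ t0) := by
            simp [List.mem_cons, Ne.symm hce]
          have : pvFin p (buf ++ [c]) false t0 = pvFin p buf false (c :: t0) := by
            simp only [pvFin, hmem, List.takeWhile_cons]
            have hcb : (c != '=') = true := by simp [hce]
            rw [hcb]
            simp
          rw [this]

-- ===== VERDICT (by name: the statement is the Claim_ definition above) =====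
theorem parse_cookie_names_from_cookie_header_py_spec : Claim_equal_parse_cookie_names_from_cookie_header_py := by
  intro raw_cookie _
  unfold Spec_parse_cookie_names_from_cookie_header_py
  simp only [parse_cookie_names_from_cookie_header_py, parse_cookie_names_from_cookie_header_py_alt]
  by_cases h : PySem.Str.strip raw_cookie = ""
  · rw [h]
    decide
  · rw [if_neg (by simpa using h)]
    have hl : (PySem.Str.strip raw_cookie).toList = PySem.Chars.strip raw_cookie.toList :=
      PySem.Str.toList_strip raw_cookie
    have hsplit : ((PySem.Str.split? (PySem.Str.strip raw_cookie) ";").getD [])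
        = (List.splitOnP (fun c => c == ';') (PySem.Chars.strip raw_cookie.toList)).map String.ofList := by
      rw [PySem.Str.split?, PySem.Chars.split?]
      rw [if_neg (by decide)]
      simp only [Option.map_some, Option.getD_some]
      rw [hl]
      rw [show (";" : String).toList = [';'] from by decide]
      rw [pySplitOn_eq]
    rw [hsplit, afold]
    obtain ⟨s0, rest, hs⟩ := List.exists_cons_of_ne_nil
      (List.splitOnP_ne_nil (fun c => c == ';') (PySem.Chars.strip raw_cookie.toList))
    rw [hs]
    rw [hl, machine (PySem.Chars.strip raw_cookie.toList) ([], PySem.Set.empty) [] false s0 rest hs]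
    simp only [List.foldl_cons]
    have : pvFin ([], PySem.Set.empty) [] false s0 = pvSegStep ([], PySem.Set.empty) s0 := by
      simp [pvFin, pvSegStep]
    rw [this]
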